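-- pv_equiv track=rewrite | github.com/Olauge-Secret/80 | sample-miner-api/src/services/components.py | _find_last_json_object
-- ===== SOURCE A (Python) =====
-- from typing import List, Optional
--
-- def _find_last_json_object(text: str) -> Optional[str]:
--     """Find the last complete JSON object in text by matching braces."""
--     if "}" not in text:
--         return None
--
--     last_brace = text.rfind("}")
--     depth = 0
--     start_pos = last_brace
--
--     # Find matching opening brace
--     for i in range(last_brace, -1, -1):
--         if text[i] == "}":
--             depth += 1
--         elif text[i] == "{":
--             depth -= 1
--             if depth == 0:
--                 return text[i:last_brace + 1]
--
--     return None
-- ===== SOURCE B (Python) =====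
-- from typing import Optional
--
-- def _find_last_json_object(text: str) -> Optional[str]:
--     """Single forward pass: keep a stack of indices of unmatched '{' and
--     remember the substring matched at the most recent '}' (None if that
--     '}' was unmatched)."""
--     stack = []
--     result = None
--     for i, ch in enumerate(text):
--         if ch == "{":
--             stack.append(i)
--         elif ch == "}":
--             if stack:
--                 result = text[stack.pop():i + 1]
--             else:
--                 result = None
--     return result
-- ===== Notes on version B (the rewrite author's own statement) =====
-- stated objective: alternative
-- what changed: Replaces the rfind-then-backward depth-counting scan with a single forward pass that maintains a stack of indices of unmatched opening braces and records the substring matched at the most recent closing brace (reset to None when that closing brace is unmatched).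
import Mathlib
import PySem

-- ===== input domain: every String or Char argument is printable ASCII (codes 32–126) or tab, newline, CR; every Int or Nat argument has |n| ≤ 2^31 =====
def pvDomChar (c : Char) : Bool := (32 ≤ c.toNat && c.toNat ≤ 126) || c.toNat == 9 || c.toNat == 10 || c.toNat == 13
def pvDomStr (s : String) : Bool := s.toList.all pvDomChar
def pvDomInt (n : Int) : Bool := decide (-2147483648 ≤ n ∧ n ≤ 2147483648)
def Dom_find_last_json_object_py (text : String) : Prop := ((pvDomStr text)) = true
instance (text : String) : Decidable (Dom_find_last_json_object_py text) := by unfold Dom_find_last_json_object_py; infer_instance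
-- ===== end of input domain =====

-- B replaces A's rfind + backward depth-counting scan by one forward pass with a stack
-- of indices of unmatched '{' (alternative decomposition; same asymptotic cost).

-- ===== PORT A =====
-- 'for i in range(last_brace, -1, -1)' becomes the obvious downward recursion on i : Nat
-- (last_brace = text.rfind("}") ≥ 0 under the guard, so the .toNat below is exact).
def pvLoopA (text : String) (lb : Nat) : Nat → Int → Option String
  | i, depth =>
    match PySem.Str.pyGet? text (i : Int) with
    | none => none  -- unreachable: 0 ≤ i ≤ lb < len(text) whenever called
    | some c =>
      if c = '}' then
        match i with
        | 0 => none
        | i' + 1 => pvLoopA text lb i' (depth + 1)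
      else if c = '{' then
        if depth - 1 = 0 then
          some (PySem.Str.slice text (some (i : Int)) (some ((lb : Int) + 1)))
        else
          match i with
          | 0 => none
          | i' + 1 => pvLoopA text lb i' (depth - 1)
      else
        match i with
        | 0 => none
        | i' + 1 => pvLoopA text lb i' depth

def find_last_json_object_py (text : String) : Option String :=
  if !(PySem.Str.isIn "}" text) then none
  else
    let last_brace := PySem.Str.rfind text "}"
    pvLoopA text last_brace.toNat last_brace.toNat 0

-- ===== PORT B =====
-- 'for i, ch in enumerate(text)' as recursion over the character list with an index counter;
-- the Python list 'stack' (append/pop at the end) is the Lean list with its head as top.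
def pvLoopB (text : String) : List Char → Nat → List Nat → Option String → Option String
  | [], _, _, result => result
  | c :: rest, i, stack, result =>
    if c = '{' then pvLoopB text rest (i + 1) (i :: stack) result
    else if c = '}' then
      match stack with
      | o :: stack' =>
          pvLoopB text rest (i + 1) stack'
            (some (PySem.Str.slice text (some (o : Int)) (some ((i : Int) + 1))))
      | [] => pvLoopB text rest (i + 1) [] none
    else pvLoopB text rest (i + 1) stack result

def find_last_json_object_py_alt (text : String) : Option String :=
  pvLoopB text text.toList 0 [] none

-- ===== PRECONDITION & SPEC =====
def Spec_find_last_json_object_py (text : String) (out : Option String) : Prop := out = find_last_json_object_py_alt text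
instance (text : String) (out : Option String) : Decidable (Spec_find_last_json_object_py text out) := by unfold Spec_find_last_json_object_py; infer_instance

-- ===== CLAIM (what is proved, stated in full; the proofs are below) =====
def Claim_equal_find_last_json_object_py : Prop := ∀ (text : String), Dom_find_last_json_object_py text → Spec_find_last_json_object_py text (find_last_json_object_py text)

-- ===== LEMMAS AND PROOFS =====

-- Full state (stack, result) of B's forward pass.
def pvRunB (text : String) : List Char → Nat → (List Nat × Option String) → (List Nat × Option String)
  | [], _, s => s
  | c :: rest, i, (st, r) =>
    if c = '{' then pvRunB text rest (i + 1) (i :: st, r)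
    else if c = '}' then
      match st with
      | o :: st' =>
          pvRunB text rest (i + 1)
            (st', some (PySem.Str.slice text (some (o : Int)) (some ((i : Int) + 1))))
      | [] => pvRunB text rest (i + 1) ([], none)
    else pvRunB text rest (i + 1) (st, r)

-- Stack component alone (pop = tail, also on the empty stack).
def pvStk : List Char → Nat → List Nat → List Nat
  | [], _, st => st
  | c :: rest, i, st =>
      pvStk rest (i + 1) (if c = '{' then i :: st else if c = '}' then st.tail else st)

theorem pvLoopB_eq_runB (text : String) : ∀ (l : List Char) (i : Nat) (st : List Nat)
    (r : Option String), pvLoopB text l i st r = (pvRunB text l i (st, r)).2 := by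
  intro l
  induction l with
  | nil => intro i st r; simp [pvLoopB, pvRunB]
  | cons c rest ih =>
    intro i st r
    by_cases h1 : c = '{'
    · simp [pvLoopB, pvRunB, h1, ih]
    · by_cases h2 : c = '}'
      · cases st with
        | nil => simp [pvLoopB, pvRunB, h2, ih]
        | cons o st' => simp [pvLoopB, pvRunB, h2, ih]
      · simp [pvLoopB, pvRunB, h1, h2, ih]

theorem pvRunB_append (text : String) : ∀ (l₁ l₂ : List Char) (i : Nat)
    (s : List Nat × Option String),
    pvRunB text (l₁ ++ l₂) i s = pvRunB text l₂ (i + l₁.length) (pvRunB text l₁ i s) := by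
  intro l₁
  induction l₁ with
  | nil => intro l₂ i s; simp [pvRunB]
  | cons c rest ih =>
    intro l₂ i s
    obtain ⟨st, r⟩ := s
    by_cases h1 : c = '{'
    · simp [pvRunB, h1, ih]; ring_nf
    · by_cases h2 : c = '}'
      · cases st with
        | nil => simp [pvRunB, h2, ih]; ring_nf
        | cons o st' => simp [pvRunB, h2, ih]; ring_nf
      · simp [pvRunB, h1, h2, ih]; ring_nf

theorem pvRunB_fst (text : String) : ∀ (l : List Char) (i : Nat) (st : List Nat)
    (r : Option String), (pvRunB text l i (st, r)).1 = pvStk l i st := by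
  intro l
  induction l with
  | nil => intro i st r; simp [pvRunB, pvStk]
  | cons c rest ih =>
    intro i st r
    by_cases h1 : c = '{'
    · simp [pvRunB, pvStk, h1, ih]
    · by_cases h2 : c = '}'
      · cases st with
        | nil => simp [pvRunB, pvStk, h2, ih]
        | cons o st' => simp [pvRunB, pvStk, h2, ih]
      · simp [pvRunB, pvStk, h1, h2, ih]

theorem pvRunB_snd_no_close (text : String) : ∀ (l : List Char), '}' ∉ l →
    ∀ (i : Nat) (st : List Nat) (r : Option String), (pvRunB text l i (st, r)).2 = r := by
  intro l
  induction l with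
  | nil => intro _ i st r; simp [pvRunB]
  | cons c rest ih =>
    intro h i st r
    simp only [List.mem_cons, not_or] at h
    by_cases h1 : c = '{'
    · rw [show pvRunB text (c :: rest) i (st, r) = pvRunB text rest (i + 1) (i :: st, r) by
        simp [pvRunB, h1]]
      exact ih h.2 _ _ _
    · rw [show pvRunB text (c :: rest) i (st, r) = pvRunB text rest (i + 1) (st, r) by
        simp [pvRunB, h1, Ne.symm h.1]]
      exact ih h.2 _ _ _

theorem pvStk_append : ∀ (l₁ l₂ : List Char) (i : Nat) (st : List Nat),
    pvStk (l₁ ++ l₂) i st = pvStk l₂ (i + l₁.length) (pvStk l₁ i st) := by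
  intro l₁
  induction l₁ with
  | nil => intro l₂ i st; simp [pvStk]
  | cons c rest ih =>
    intro l₂ i st
    simp only [List.cons_append, pvStk, ih, List.length_cons]
    ring_nf

-- One-step unfolding lemmas for A's backward scan.
theorem pvStepA_close_zero (text : String) (lb : Nat) (d : Int)
    (h : PySem.Str.pyGet? text ((0 : Nat) : Int) = some '}') :
    pvLoopA text lb 0 d = none := by
  rw [pvLoopA.eq_def]; simp_all

theorem pvStepA_close_succ (text : String) (lb i' : Nat) (d : Int)
    (h : PySem.Str.pyGet? text (((i' + 1 : Nat) : Int)) = some '}') :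
    pvLoopA text lb (i' + 1) d = pvLoopA text lb i' (d + 1) := by
  rw [pvLoopA.eq_def]; simp_all

theorem pvStepA_open_zero (text : String) (lb : Nat) (d : Int)
    (h : PySem.Str.pyGet? text ((0 : Nat) : Int) = some '{') :
    pvLoopA text lb 0 d =
      if d - 1 = 0 then
        some (PySem.Str.slice text (some ((0 : Nat) : Int)) (some ((lb : Int) + 1)))
      else none := by
  rw [pvLoopA.eq_def]; simp_all

theorem pvStepA_open_succ (text : String) (lb i' : Nat) (d : Int)
    (h : PySem.Str.pyGet? text (((i' + 1 : Nat) : Int)) = some '{') :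
    pvLoopA text lb (i' + 1) d =
      if d - 1 = 0 then
        some (PySem.Str.slice text (some ((i' + 1 : Nat) : Int)) (some ((lb : Int) + 1)))
      else pvLoopA text lb i' (d - 1) := by
  rw [pvLoopA.eq_def]; simp_all

theorem pvStepA_other_zero (text : String) (lb : Nat) (d : Int) (c : Char)
    (h : PySem.Str.pyGet? text ((0 : Nat) : Int) = some c)
    (h1 : c ≠ '{') (h2 : c ≠ '}') :
    pvLoopA text lb 0 d = none := by
  rw [pvLoopA.eq_def]; simp_all

theorem pvStepA_other_succ (text : String) (lb i' : Nat) (d : Int) (c : Char)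
    (h : PySem.Str.pyGet? text (((i' + 1 : Nat) : Int)) = some c)
    (h1 : c ≠ '{') (h2 : c ≠ '}') :
    pvLoopA text lb (i' + 1) d = pvLoopA text lb i' d := by
  rw [pvLoopA.eq_def]; simp_all

-- A's backward scan over a nonempty prefix 'pre' of the text, entered with depth d ≥ 1,
-- returns the (d-1)-st element (from the top) of B's forward stack over 'pre'.
theorem pvLoopA_eq_stk (text : String) (lb : Nat) :
    ∀ (pre rest : List Char) (d : Int), pre ≠ [] → 1 ≤ d → text.toList = pre ++ rest →
    pvLoopA text lb (pre.length - 1) d =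
      ((pvStk pre 0 [])[(d - 1).toNat]?).map
        (fun o => PySem.Str.slice text (some (o : Int)) (some ((lb : Int) + 1))) := by
  intro pre
  induction pre using List.reverseRecOn with
  | nil => intro rest d h; exact absurd rfl h
  | append_singleton ys c ih =>
    intro rest d _ hd htext
    have hget : PySem.Str.pyGet? text ((ys.length : Nat) : Int) = some c := by
      simp only [PySem.Str.pyGet?_natCast]
      rw [htext]
      simp
    have hlen : (ys ++ [c]).length - 1 = ys.length := by simp
    rw [hlen]
    by_cases h1 : c = '{'
    · subst h1
      have hstk1 : pvStk (ys ++ ['{']) 0 [] = ys.length :: pvStk ys 0 [] := by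
        rw [pvStk_append]; simp [pvStk]
      rw [hstk1]
      by_cases hynil : ys = []
      · subst hynil
        simp only [List.length_nil] at hget ⊢
        rw [pvStepA_open_zero text lb d hget]
        by_cases hd1 : d - 1 = 0
        · have h0 : (d - 1).toNat = 0 := by omega
          simp [hd1, pvStk]
        · rw [if_neg hd1]
          have h0 : ((0 : Nat) :: pvStk [] 0 [])[(d - 1).toNat]? = none := by
            rw [List.getElem?_eq_none]
            simp [pvStk]; omega
          rw [h0]
          simp
      · obtain ⟨m, hm⟩ : ∃ m, ys.length = m + 1 := by
          cases ys with
          | nil => exact absurd rfl hynil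
          | cons a t => exact ⟨t.length, by simp⟩
        rw [hm] at hget
        rw [hm, pvStepA_open_succ text lb m d hget]
        by_cases hd1 : d - 1 = 0
        · have h0 : (d - 1).toNat = 0 := by omega
          simp [hd1]
        · rw [if_neg hd1]
          have hih := ih ('{' :: rest) (d - 1) hynil (by omega) (by rw [htext]; simp)
          rw [show ys.length - 1 = m by omega] at hih
          rw [hih]
          have hidx : (d - 1).toNat = (d - 1 - 1).toNat + 1 := by omega
          rw [hidx, List.getElem?_cons_succ]
    · by_cases h2 : c = '}'
      · subst h2
        have hstk2 : pvStk (ys ++ ['}']) 0 [] = (pvStk ys 0 []).tail := by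
          rw [pvStk_append]; simp [pvStk]
        rw [hstk2]
        by_cases hynil : ys = []
        · subst hynil
          simp only [List.length_nil] at hget ⊢
          rw [pvStepA_close_zero text lb d hget]
          simp [pvStk]
        · obtain ⟨m, hm⟩ : ∃ m, ys.length = m + 1 := by
            cases ys with
            | nil => exact absurd rfl hynil
            | cons a t => exact ⟨t.length, by simp⟩
          rw [hm] at hget
          rw [hm, pvStepA_close_succ text lb m d hget]
          have hih := ih ('}' :: rest) (d + 1) hynil (by omega) (by rw [htext]; simp)
          rw [show ys.length - 1 = m by omega] at hih
          rw [hih, List.getElem?_tail]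
          have hidx : (d + 1 - 1).toNat = (d - 1).toNat + 1 := by omega
          rw [hidx]
      · have hstk3 : pvStk (ys ++ [c]) 0 [] = pvStk ys 0 [] := by
          rw [pvStk_append]; simp [pvStk, h1, h2]
        rw [hstk3]
        by_cases hynil : ys = []
        · subst hynil
          simp only [List.length_nil] at hget ⊢
          rw [pvStepA_other_zero text lb d c hget h1 h2]
          simp [pvStk]
        · obtain ⟨m, hm⟩ : ∃ m, ys.length = m + 1 := by
            cases ys with
            | nil => exact absurd rfl hynil
            | cons a t => exact ⟨t.length, by simp⟩
          rw [hm] at hget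
          rw [hm, pvStepA_other_succ text lb m d c hget h1 h2]
          have hih := ih (c :: rest) d hynil hd (by rw [htext]; simp)
          rw [show ys.length - 1 = m by omega] at hih
          rw [hih]

-- last-occurrence decomposition
theorem pv_last_occ {c : Char} : ∀ (l : List Char), c ∈ l →
    ∃ pre suf, l = pre ++ c :: suf ∧ c ∉ suf := by
  intro l
  induction l using List.reverseRecOn with
  | nil => intro h; simp at h
  | append_singleton ys x ih =>
    intro h
    by_cases hx : x = c
    · exact ⟨ys, [], by simp [hx], by simp⟩
    · have : c ∈ ys := by
        rcases List.mem_append.mp h with h' | h'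
        · exact h'
        · simp at h'; exact absurd h'.symm hx
      obtain ⟨pre, suf, heq, hns⟩ := ih this
      refine ⟨pre, suf ++ [x], by simp [heq], ?_⟩
      simp only [List.mem_append, List.mem_singleton, not_or]
      exact ⟨hns, fun hcx => hx hcx.symm⟩

theorem pv_isPrefixOf_singleton {c : Char} : ∀ (l : List Char),
    [c].isPrefixOf l = true ↔ ∃ t, l = c :: t := by
  intro l
  cases l with
  | nil => simp [List.isPrefixOf]
  | cons y t =>
    constructor
    · intro h
      have hc : c = y := by
        simpa [List.isPrefixOf] using h
      exact ⟨t, by rw [hc]⟩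
    · rintro ⟨t', h⟩
      injection h with h1 h2
      subst h1
      simp [List.isPrefixOf]

theorem pv_rfind_go (c : Char) (pre suf : List Char) (hns : c ∉ suf) :
    ∀ (k : Nat), pre.length ≤ k →
    PySem.Chars.rfind.go (pre ++ c :: suf) [c] k = (pre.length : Int) := by
  intro k
  induction k with
  | zero =>
    intro hk
    have hpre : pre = [] := by
      cases pre with | nil => rfl | cons _ _ => simp at hk
    subst hpre
    rw [PySem.Chars.rfind.go]
    simp [List.isPrefixOf]
  | succ j ih =>
    intro hk
    rw [PySem.Chars.rfind.go]
    by_cases hj : pre.length = j + 1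
    · have hdrop : List.drop (j + 1) (pre ++ c :: suf) = c :: suf := by
        rw [← hj, List.drop_left]
      rw [hdrop]
      simp [List.isPrefixOf, hj]
    · have hlt : pre.length ≤ j := by omega
      have hdrop : List.drop (j + 1) (pre ++ c :: suf) =
          List.drop (j + 1 - pre.length) (c :: suf) := by
        rw [List.drop_append]
        simp [show pre.length ≤ j + 1 by omega]
      have hnp : ¬ ([c].isPrefixOf (List.drop (j + 1) (pre ++ c :: suf)) = true) := by
        rw [hdrop]
        intro hp
        obtain ⟨t, ht⟩ := (pv_isPrefixOf_singleton _).mp hp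
        have hmem : c ∈ List.drop (j + 1 - pre.length) (c :: suf) := by
          rw [ht]; simp
        have h1 : 1 ≤ j + 1 - pre.length := by omega
        have : c ∈ List.drop (j + 1 - pre.length - 1) suf := by
          have : List.drop (j + 1 - pre.length) (c :: suf) =
              List.drop (j + 1 - pre.length - 1) suf := by
            cases hh : j + 1 - pre.length with
            | zero => omega
            | succ m => simp
          rwa [this] at hmem
        exact hns (List.mem_of_mem_drop this)
      rw [if_neg hnp]
      exact ih hlt

theorem pv_singleton_infix {c : Char} (l : List Char) : [c] <:+: l ↔ c ∈ l := by
  constructor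
  · rintro ⟨s, t, h⟩
    rw [← h]; simp
  · intro h
    obtain ⟨pre, suf, heq, _⟩ := pv_last_occ l h
    exact ⟨pre, suf, by rw [heq]; simp⟩

-- ===== VERDICT (by name: the statement is the Claim_ definition above) =====
theorem find_last_json_object_py_spec : Claim_equal_find_last_json_object_py := by
  intro text _
  unfold Spec_find_last_json_object_py find_last_json_object_py find_last_json_object_py_alt
  by_cases hmem : '}' ∈ text.toList
  · -- "}" occurs: decompose at its last occurrence
    obtain ⟨pre, suf, heq, hns⟩ := pv_last_occ text.toList hmem
    have hin : PySem.Str.isIn "}" text = true := by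
      rw [PySem.Str.isIn_eq, PySem.Chars.isIn_iff_infix]
      show ['}'] <:+: text.toList
      rw [pv_singleton_infix]; exact hmem
    rw [hin]
    simp only [Bool.not_true, Bool.false_eq_true, if_false]
    have hrfind : PySem.Str.rfind text "}" = (pre.length : Int) := by
      rw [PySem.Str.rfind_eq]
      show PySem.Chars.rfind text.toList ['}'] = _
      unfold PySem.Chars.rfind
      rw [heq]
      exact pv_rfind_go '}' pre suf hns _ (by simp)
    rw [hrfind]
    simp only [Int.toNat_natCast]
    -- B's value: run over pre, take the step at the last '}', suf changes nothing
    have hfst := pvRunB_fst text pre 0 [] none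
    have hB : pvLoopB text text.toList 0 [] none =
        match pvStk pre 0 [] with
        | o :: _ => some (PySem.Str.slice text (some (o : Int)) (some ((pre.length : Int) + 1)))
        | [] => none := by
      rw [pvLoopB_eq_runB, heq, pvRunB_append text pre ('}' :: suf)]
      rcases hsr : pvRunB text pre 0 ([], none) with ⟨st, r⟩
      rw [hsr] at hfst
      simp only at hfst
      rw [← hfst]
      cases st with
      | nil =>
        rw [show pvRunB text ('}' :: suf) (0 + pre.length) ([], r) =
            pvRunB text suf (0 + pre.length + 1) ([], none) by simp [pvRunB]]
        rw [pvRunB_snd_no_close text suf hns]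
      | cons o st' =>
        rw [show pvRunB text ('}' :: suf) (0 + pre.length) (o :: st', r) =
            pvRunB text suf (0 + pre.length + 1) (st',
              some (PySem.Str.slice text (some (o : Int))
                (some (((0 + pre.length : Nat) : Int) + 1)))) by simp [pvRunB]]
        rw [pvRunB_snd_no_close text suf hns]
        simp
    rw [hB]
    -- A's value: first step at i = pre.length reads '}', then the backward-scan lemma
    have hget : PySem.Str.pyGet? text ((pre.length : Nat) : Int) = some '}' := by
      simp only [PySem.Str.pyGet?_natCast]
      rw [heq]
      simp
    by_cases hpnil : pre = []
    · subst hpnil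
      simp only [List.length_nil] at hget ⊢
      rw [pvStepA_close_zero text 0 0 hget]
      simp [pvStk]
    · obtain ⟨m, hm⟩ : ∃ m, pre.length = m + 1 := by
        cases pre with
        | nil => exact absurd rfl hpnil
        | cons a t => exact ⟨t.length, by simp⟩
      rw [hm] at hget
      rw [hm, pvStepA_close_succ text (m + 1) m 0 hget]
      have hstk := pvLoopA_eq_stk text (m + 1) pre ('}' :: suf) (0 + 1) hpnil (by omega) heq
      rw [show pre.length - 1 = m by omega] at hstk
      rw [hstk]
      have h0 : ((0 : Int) + 1 - 1).toNat = 0 := by decide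
      rw [h0]
      cases pvStk pre 0 [] with
      | nil => simp
      | cons o t => simp
  · have hin : PySem.Str.isIn "}" text = false := by
      rw [PySem.Str.isIn_eq, PySem.Chars.isIn_eq_false_iff]
      show ¬ ['}'] <:+: text.toList
      rw [pv_singleton_infix]; exact hmem
    rw [hin]
    simp only [Bool.not_false, if_true]
    rw [pvLoopB_eq_runB]
    exact (pvRunB_snd_no_close text text.toList hmem 0 [] none).symm
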